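-- pv_equiv track=rewrite | github.com/ljunker/project-euler-solutions | euler-0011.py | diagonal_natural
-- ===== SOURCE A (Python) =====
-- def diagonal_natural(grid, run_len):
--     max_prod = 0
--     n, m = len(grid), len(grid[0])
--     for i in range(n - run_len + 1):
--         for j in range(m - run_len + 1):
--             product = 1
--             for k in range(run_len):
--                 product *= grid[i + k][j + k]
--             max_prod = max(max_prod, product)
--     return max_prod
-- ===== SOURCE B (Python) =====
-- def diagonal_natural(grid, run_len):
--     best = 0
--     n, m = len(grid), len(grid[0])
--     for d in range(-(m - 1), n):
--         i0, j0 = max(d, 0), max(-d, 0)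
--         diag = [grid[i0 + t][j0 + t] for t in range(min(n - i0, m - j0))]
--         for s in range(len(diag) - run_len + 1):
--             p = 1
--             for k in range(run_len):
--                 p *= diag[s + k]
--             best = max(best, p)
--     return best
-- ===== Notes on version B (the rewrite author's own statement) =====
-- stated objective: alternative
-- what changed: B traverses the grid diagonal by diagonal (extracting each diagonal for offset d = i-j, then sliding a length-run_len window along it) instead of A's double loop over window start coordinates with re-indexing into the grid for every factor.
-- outside the precondition, e.g. on diagonal_natural([[1, 1, 1], [1, 1], [1, 1, 1]], 3): A returns 1, B raises IndexError; on diagonal_natural([[]], 0): A returns 1, B returns 0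
import Mathlib
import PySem

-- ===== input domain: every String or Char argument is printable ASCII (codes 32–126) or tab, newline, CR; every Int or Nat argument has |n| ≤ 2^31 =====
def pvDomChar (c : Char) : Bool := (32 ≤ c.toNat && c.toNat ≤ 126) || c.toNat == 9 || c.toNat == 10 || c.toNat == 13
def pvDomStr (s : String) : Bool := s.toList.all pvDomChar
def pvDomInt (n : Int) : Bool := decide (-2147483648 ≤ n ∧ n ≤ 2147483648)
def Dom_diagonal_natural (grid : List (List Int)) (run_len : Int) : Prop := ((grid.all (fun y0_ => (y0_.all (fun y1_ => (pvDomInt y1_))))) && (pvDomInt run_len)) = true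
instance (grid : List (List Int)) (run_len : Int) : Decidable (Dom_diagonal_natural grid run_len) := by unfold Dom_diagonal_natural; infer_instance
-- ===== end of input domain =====

-- B walks the grid diagonal by diagonal (extracting each diagonal, then sliding a
-- window along it) instead of A's scan over window start coordinates; same cost,
-- alternative decomposition. Equivalence is about the return value.

-- ===== PORT A =====
def diagonal_natural (grid : List (List Int)) (run_len : Int) : Int :=
  let n : Int := grid.length
  let m : Int := (PySem.List.pyGetD grid 0 []).length
  (PySem.List.pyRange 0 (n - run_len + 1) 1).foldl (fun max_prod i =>
    (PySem.List.pyRange 0 (m - run_len + 1) 1).foldl (fun max_prod j =>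
      let product := (PySem.List.pyRange 0 run_len 1).foldl
        (fun product k =>
          product * PySem.List.pyGetD (PySem.List.pyGetD grid (i + k) []) (j + k) 0) 1
      max max_prod product) max_prod) 0

-- ===== PORT B =====
def diagonal_natural_alt (grid : List (List Int)) (run_len : Int) : Int :=
  let n : Int := grid.length
  let m : Int := (PySem.List.pyGetD grid 0 []).length
  (PySem.List.pyRange (-(m - 1)) n 1).foldl (fun best d =>
    let i0 : Int := max d 0
    let j0 : Int := max (-d) 0
    let diag := (PySem.List.pyRange 0 (min (n - i0) (m - j0)) 1).map
      (fun t => PySem.List.pyGetD (PySem.List.pyGetD grid (i0 + t) []) (j0 + t) 0)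
    (PySem.List.pyRange 0 ((diag.length : Int) - run_len + 1) 1).foldl (fun best s =>
      let p := (PySem.List.pyRange 0 run_len 1).foldl
        (fun p k => p * PySem.List.pyGetD diag (s + k) 0) 1
      max best p) best) 0

-- ===== PRECONDITION & SPEC =====
-- Pre_ excludes: the empty grid (A raises IndexError on grid[0]); ragged grids with a
-- row shorter than the first row (the diagonal walks can hit a missing cell: A returns
-- on a few such grids where B raises — see cites); and the single-row grid with empty
-- first row combined with run_len ≤ 0, a degenerate corner where A's 1 (a max of empty
-- products) and B's 0 (no diagonals at all) are both accidental.
def Pre_diagonal_natural (grid : List (List Int)) (run_len : Int) : Prop :=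
  grid ≠ [] ∧ (∀ row ∈ grid, (grid.headI).length ≤ row.length) ∧
    ¬(grid.length = 1 ∧ (grid.headI).length = 0 ∧ run_len ≤ 0)
instance (grid : List (List Int)) (run_len : Int) : Decidable (Pre_diagonal_natural grid run_len) := by
  unfold Pre_diagonal_natural; infer_instance

def pvWitness_diagonal_natural : List (List Int) × Int := ([[1, 2], [3, 4]], 2)

def Spec_diagonal_natural (grid : List (List Int)) (run_len : Int) (out : Int) : Prop := out = diagonal_natural_alt grid run_len
instance (grid : List (List Int)) (run_len : Int) (out : Int) : Decidable (Spec_diagonal_natural grid run_len out) := by unfold Spec_diagonal_natural; infer_instance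

-- ===== CLAIM (what is proved, stated in full; the proofs are below) =====
def Claim_equal_diagonal_natural : Prop := ∀ (grid : List (List Int)) (run_len : Int), Dom_diagonal_natural grid run_len → Pre_diagonal_natural grid run_len → Spec_diagonal_natural grid run_len (diagonal_natural grid run_len)

-- ===== LEMMAS AND PROOFS =====

-- a nested max-update loop is a running max over the flattened list of scored values
theorem pv_foldl_flat {α β : Type} (xs : List α) (h : α → List β) (f : α → β → Int) (a : Int) :
    xs.foldl (fun acc x => (h x).foldl (fun acc2 y => max acc2 (f x y)) acc) a
      = (xs.flatMap (fun x => (h x).map (f x))).foldl max a := by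
  induction xs generalizing a with
  | nil => rfl
  | cons x xs ih =>
    simp only [List.foldl_cons, List.flatMap_cons, List.foldl_append, ih, List.foldl_map]

theorem pv_foldl_max_le (t : List Int) (a c : Int) (ha : a ≤ c) (h : ∀ y ∈ t, y ≤ c) :
    t.foldl max a ≤ c := by
  induction t generalizing a with
  | nil => exact ha
  | cons y t ih =>
    exact ih (max a y) (max_le ha (h y (by simp))) (fun z hz => h z (by simp [hz]))

theorem pv_foldl_max_eq (L1 L2 : List Int) (h1 : ∀ x ∈ L1, x ∈ L2) (h2 : ∀ x ∈ L2, x ∈ L1) :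
    L1.foldl max 0 = L2.foldl max 0 := by
  apply le_antisymm
  · exact pv_foldl_max_le L1 0 _ (PySem.List.le_foldl_max L2 0).1
      (fun y hy => (PySem.List.le_foldl_max L2 0).2 y (h1 y hy))
  · exact pv_foldl_max_le L2 0 _ (PySem.List.le_foldl_max L1 0).1
      (fun y hy => (PySem.List.le_foldl_max L1 0).2 y (h2 y hy))

-- the A-side window product, shifted: product over k of g (i+k) (j+k)
def pvProd (g : Int → Int → Int) (r i j : Int) : Int :=
  (PySem.List.pyRange 0 r 1).foldl (fun p k => p * g (i + k) (j + k)) 1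

theorem pvProd_nonpos (g : Int → Int → Int) (r i j : Int) (hr : r ≤ 0) : pvProd g r i j = 1 := by
  unfold pvProd
  rw [PySem.List.pyRange_one_eq_nil (by omega)]
  rfl

-- ===== VERDICT (by name: the statement is the Claim_ definition above) =====
theorem diagonal_natural_spec : Claim_equal_diagonal_natural := by
  unfold Claim_equal_diagonal_natural
  intro grid run_len _ hpre
  obtain ⟨hne, _, hcorner⟩ := hpre
  unfold Spec_diagonal_natural
  set n : Int := (grid.length : Int) with hn
  set m : Int := ((PySem.List.pyGetD grid 0 []).length : Int) with hm
  have hn1 : 1 ≤ n := by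
    have : grid.length ≠ 0 := fun h => hne (List.eq_nil_of_length_eq_zero h)
    omega
  have hm0 : 0 ≤ m := by positivity
  -- the cell accessor shared by both ports
  set g : Int → Int → Int :=
    fun i j => PySem.List.pyGetD (PySem.List.pyGetD grid i []) j 0 with hg
  -- diagonal lengths and extracted diagonals
  set Lf : Int → Int := fun d => min (n - max d 0) (m - max (-d) 0) with hLf
  set dg : Int → List Int := fun d =>
    (PySem.List.pyRange 0 (Lf d) 1).map (fun t => g (max d 0 + t) (max (-d) 0 + t)) with hdg
  have hlen : ∀ d : Int, ((dg d).length : Int) = max (Lf d) 0 := by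
    intro d
    simp only [hdg, List.length_map, PySem.List.length_pyRange_one]
    omega
  have hh : PySem.List.pyGetD grid 0 ([] : List Int) = grid.headI := by
    cases grid with
    | nil => exact absurd rfl hne
    | cons a l => simp [PySem.List.pyGetD_zero_cons]
  have hmh : m = (grid.headI.length : Int) := by rw [hm, hh]
  have hnm : ¬(n = 1 ∧ m = 0 ∧ run_len ≤ 0) := by
    intro hcon
    obtain ⟨h1, h2, h3⟩ := hcon
    exact hcorner ⟨by omega, by omega, h3⟩
  -- A as a running max over the flattened list of its window products
  have hA : diagonal_natural grid run_len
      = ((PySem.List.pyRange 0 (n - run_len + 1) 1).flatMap (fun i =>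
          (PySem.List.pyRange 0 (m - run_len + 1) 1).map (fun j => pvProd g run_len i j))).foldl max 0 := by
    rw [← pv_foldl_flat]
    rfl
  -- B as a running max over the flattened list of its diagonal-window products
  have hB : diagonal_natural_alt grid run_len
      = ((PySem.List.pyRange (-(m - 1)) n 1).flatMap (fun d =>
          (PySem.List.pyRange 0 (((dg d).length : Int) - run_len + 1) 1).map (fun s =>
            (PySem.List.pyRange 0 run_len 1).foldl
              (fun p k => p * PySem.List.pyGetD (dg d) (s + k) 0) 1))).foldl max 0 := by
    rw [← pv_foldl_flat]
    rfl
  rw [hA, hB]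
  apply pv_foldl_max_eq
  · -- every A-window product appears among B's diagonal-window products
    intro x hx
    simp only [List.mem_flatMap, List.mem_map, PySem.List.mem_pyRange_one, hlen] at hx ⊢
    obtain ⟨i, ⟨hi0, hi1⟩, j, ⟨⟨hj0, hj1⟩, hx⟩⟩ := hx
    by_cases hr : 1 ≤ run_len
    · have hi0' : max (i - j) 0 = i - min i j := by omega
      have hj0' : max (-(i - j)) 0 = j - min i j := by omega
      have hL : run_len + min i j ≤ Lf (i - j) := by
        simp only [hLf, hi0', hj0']; omega
      refine ⟨i - j, ⟨by omega, by omega⟩, min i j, ⟨⟨by omega, by omega⟩, ?_⟩⟩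
      rw [← hx]
      unfold pvProd
      apply PySem.List.foldl_congr_mem
      intro acc k hk
      rw [PySem.List.mem_pyRange_one] at hk
      rw [hdg, PySem.List.pyGetD_map_pyRange_of_nonneg _ _ _ _ (by omega) (by omega)]
      simp only [hi0', hj0']
      congr 2 <;> omega
    · -- run_len ≤ 0 : every product is the empty product 1 on both sides
      refine ⟨-(m - 1), ⟨le_refl _, by omega⟩, 0, ⟨⟨le_refl _, by omega⟩, ?_⟩⟩
      rw [← hx, pvProd_nonpos g run_len i j (by omega),
          PySem.List.pyRange_one_eq_nil (by omega : run_len ≤ 0)]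
      rfl
  · -- every B-window product appears among A's products
    intro x hx
    simp only [List.mem_flatMap, List.mem_map, PySem.List.mem_pyRange_one, hlen] at hx ⊢
    obtain ⟨d, ⟨hd0, hd1⟩, s, ⟨⟨hs0, hs1⟩, hx⟩⟩ := hx
    by_cases hr : 1 ≤ run_len
    · have hL : s + run_len ≤ Lf d := by omega
      have hL' : s + run_len ≤ min (n - max d 0) (m - max (-d) 0) := by
        simpa only [hLf] using hL
      refine ⟨max d 0 + s, ⟨by omega, by omega⟩, max (-d) 0 + s, ⟨⟨by omega, by omega⟩, ?_⟩⟩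
      rw [← hx]
      unfold pvProd
      apply PySem.List.foldl_congr_mem
      intro acc k hk
      rw [PySem.List.mem_pyRange_one] at hk
      rw [hdg, PySem.List.pyGetD_map_pyRange_of_nonneg _ _ _ _ (by omega) (by omega)]
      congr 2 <;> omega
    · refine ⟨0, ⟨le_refl _, by omega⟩, 0, ⟨⟨le_refl _, by omega⟩, ?_⟩⟩
      rw [pvProd_nonpos g run_len 0 0 (by omega), ← hx,
          PySem.List.pyRange_one_eq_nil (by omega : run_len ≤ 0)]
      rfl
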